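-- pv_equiv track=rewrite | github.com/mehmetalikir/Introduction-to-Python-Programming-and-Data-Structures-3rd-edition | chapter08/Exercise08_23.py | isEvenParity
-- ===== SOURCE A (Python) =====
-- def isEvenParity(grid):
--     for i in range(len(grid)):
--         sum = 0
--         for j in range(len(grid[i])):
--             sum += grid[i][j]
--         if sum % 2 != 0:
--             return False
--
--     for j in range(len(grid[0])):
--         sum = 0
--         for i in range(len(grid)):
--             sum += grid[i][j]
--         if sum % 2 != 0:
--             return False
--
--     return True
-- ===== SOURCE B (Python) =====
-- def isEvenParity(grid):
--     ncols = len(grid[0])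
--     col_sums = [0] * ncols
--     for row in grid:
--         if sum(row) % 2 != 0:
--             return False
--         for j, x in enumerate(row[:ncols]):
--             col_sums[j] += x
--     return all(c % 2 == 0 for c in col_sums)
-- ===== Notes on version B (the rewrite author's own statement) =====
-- stated objective: alternative
-- what changed: Single pass over the rows that checks each row's parity and maintains a running column-sum table, instead of A's two separate phases that read every cell twice (row scan then per-column rescan).
-- outside the precondition, e.g. on isEvenParity([[2, 2], [1, 1, 2], [2]]): A returns False, B returns False
import Mathlib
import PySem

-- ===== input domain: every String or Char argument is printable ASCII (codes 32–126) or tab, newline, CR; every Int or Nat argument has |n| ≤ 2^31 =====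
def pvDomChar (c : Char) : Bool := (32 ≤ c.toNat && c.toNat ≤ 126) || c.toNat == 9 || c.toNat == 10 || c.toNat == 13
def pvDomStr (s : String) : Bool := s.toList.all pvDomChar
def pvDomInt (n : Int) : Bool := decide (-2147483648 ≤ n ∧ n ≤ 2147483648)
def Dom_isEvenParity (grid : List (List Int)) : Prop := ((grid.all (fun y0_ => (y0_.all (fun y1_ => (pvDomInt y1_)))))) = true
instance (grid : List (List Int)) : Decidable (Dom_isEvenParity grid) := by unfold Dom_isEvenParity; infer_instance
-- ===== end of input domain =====

-- B replaces A's two phases (row scan, then a per-column rescan of the whole grid)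
-- by one pass that checks each row's parity and maintains a running column-sum table.

-- ===== PORT A =====
-- first loop of A: for each row, sum it and return False at the first odd row sum
def aRowsCheck : List (List Int) → Bool
  | [] => true
  | r :: rs =>
      if PySem.Int.mod (r.foldl (· + ·) 0) 2 ≠ 0 then false else aRowsCheck rs

-- inner loop of A's column phase: sum = 0; for i in range(len(grid)): sum += grid[i][j]
-- (pyGetD is exact here: Pre_ guarantees j is in range for every row reached)
def aColSum (grid : List (List Int)) (j : Nat) : Int :=
  grid.foldl (fun s row => s + PySem.List.pyGetD row (Int.ofNat j) 0) 0

-- second loop of A: for j in range(len(grid[0])), return False at the first odd column sum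
def aColsCheck (grid : List (List Int)) : List Nat → Bool
  | [] => true
  | j :: js =>
      if PySem.Int.mod (aColSum grid j) 2 ≠ 0 then false else aColsCheck grid js

-- grid[0] ported as pyGetD grid 0 []: exact under Pre_ (grid ≠ [])
def isEvenParity (grid : List (List Int)) : Bool :=
  if aRowsCheck grid then
    aColsCheck grid (List.range (PySem.List.pyGetD grid 0 []).length)
  else false

-- ===== PORT B =====
-- 'for j, x in enumerate(row[:ncols]): col_sums[j] += x' — elementwise add of the
-- truncated row onto the column-sum table (the table's length never changes)
def bAddRow : List Int → List Int → List Int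
  | cols, [] => cols
  | [], _ => []
  | c :: cs, x :: xs => (c + x) :: bAddRow cs xs

-- the row loop of B: none models the early 'return False' at an odd row
def bLoop : List (List Int) → List Int → Option (List Int)
  | [], cols => some cols
  | row :: rs, cols =>
      if PySem.Int.mod (row.foldl (· + ·) 0) 2 ≠ 0 then none
      else bLoop rs (bAddRow cols (row.take cols.length))

-- grid[0] ported as pyGetD grid 0 []: exact under Pre_ (grid ≠ [])
def isEvenParity_alt (grid : List (List Int)) : Bool :=
  match bLoop grid (List.replicate (PySem.List.pyGetD grid 0 []).length 0) with
  | none => false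
  | some cols => cols.all (fun c => PySem.Int.mod c 2 == 0)

-- ===== PRECONDITION & SPEC =====
-- Pre_ excludes the empty grid, where both programs raise IndexError on grid[0], and
-- ragged grids whose every row sum is even and some row is shorter than the first row:
-- there A's column phase either raises IndexError or returns a value that depends on
-- which defect (odd column vs short row) its rescan meets first, while B sums whatever
-- entries exist.
def Pre_isEvenParity (grid : List (List Int)) : Prop :=
  grid ≠ [] ∧
    ((∃ r ∈ grid, PySem.Int.mod (r.foldl (· + ·) 0) 2 ≠ 0) ∨
      ∀ r ∈ grid, (PySem.List.pyGetD grid 0 []).length ≤ r.length)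

instance (grid : List (List Int)) : Decidable (Pre_isEvenParity grid) := by
  unfold Pre_isEvenParity; infer_instance

def pvWitness_isEvenParity : List (List Int) := [[2, 2], [2, 2]]

def Spec_isEvenParity (grid : List (List Int)) (out : Bool) : Prop := out = isEvenParity_alt grid
instance (grid : List (List Int)) (out : Bool) : Decidable (Spec_isEvenParity grid out) := by unfold Spec_isEvenParity; infer_instance

-- ===== CLAIM (what is proved, stated in full; the proofs are below) =====
def Claim_equal_isEvenParity : Prop := ∀ (grid : List (List Int)), Dom_isEvenParity grid → Pre_isEvenParity grid → Spec_isEvenParity grid (isEvenParity grid)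

-- ===== LEMMAS AND PROOFS =====

-- If A's row phase trips, B's row loop trips too (at the same first odd row).
theorem bLoop_none_of_rows_false (grid : List (List Int)) (cols : List Int)
    (h : aRowsCheck grid = false) : bLoop grid cols = none := by
  induction grid generalizing cols with
  | nil => simp [aRowsCheck] at h
  | cons r rs ih =>
      unfold aRowsCheck at h
      unfold bLoop
      by_cases hr : PySem.Int.mod (r.foldl (· + ·) 0) 2 ≠ 0
      · rw [if_pos hr]
      · rw [if_neg hr] at h
        rw [if_neg hr]
        exact ih _ h

-- If every row sum is even, B's row loop runs to the end and returns the fold of bAddRow.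
theorem bLoop_some_of_rows_true (grid : List (List Int)) (cols : List Int)
    (h : aRowsCheck grid = true) :
    bLoop grid cols =
      some (grid.foldl (fun c row => bAddRow c (row.take c.length)) cols) := by
  induction grid generalizing cols with
  | nil => simp [bLoop]
  | cons r rs ih =>
      unfold aRowsCheck at h
      unfold bLoop
      by_cases hr : PySem.Int.mod (r.foldl (· + ·) 0) 2 ≠ 0
      · rw [if_pos hr] at h; exact absurd h (by simp)
      · rw [if_neg hr] at h
        rw [if_neg hr, ih _ h]
        simp [List.foldl_cons]

theorem bAddRow_length (cols xs : List Int) : (bAddRow cols xs).length = cols.length := by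
  induction cols generalizing xs with
  | nil => cases xs <;> simp [bAddRow]
  | cons c cs ih => cases xs <;> simp [bAddRow, ih]

theorem bAddRow_getD (cols xs : List Int) (j : Nat) (hj : j < cols.length)
    (hx : cols.length ≤ xs.length) :
    (bAddRow cols xs).getD j 0 = cols.getD j 0 + xs.getD j 0 := by
  induction cols generalizing xs j with
  | nil => simp at hj
  | cons c cs ih =>
      cases xs with
      | nil => simp at hx
      | cons x rest =>
          cases j with
          | zero => simp [bAddRow]
          | succ k =>
              simp only [List.length_cons, Nat.add_le_add_iff_right] at hx
              simp only [List.length_cons, Nat.succ_lt_succ_iff] at hj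
              have h1 : bAddRow (c :: cs) (x :: rest) = (c + x) :: bAddRow cs rest := rfl
              rw [h1, List.getD_cons_succ, List.getD_cons_succ, List.getD_cons_succ]
              exact ih rest k hj hx

theorem fold_length (grid : List (List Int)) (cols : List Int) :
    (grid.foldl (fun c row => bAddRow c (row.take c.length)) cols).length = cols.length := by
  induction grid generalizing cols with
  | nil => rfl
  | cons r rs ih => simp [List.foldl_cons, ih, bAddRow_length]

-- pulling the accumulator out of A's column-sum fold
theorem foldl_add_init (grid : List (List Int)) (f : List Int → Int) (a : Int) :
    grid.foldl (fun s row => s + f row) a = a + grid.foldl (fun s row => s + f row) 0 := by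
  induction grid generalizing a with
  | nil => simp
  | cons r rs ih =>
      simp only [List.foldl_cons]
      rw [ih (a + f r), ih (0 + f r)]
      ring

-- the maintained column table, read at an in-range index j, is exactly A's column sum
theorem fold_getD (grid : List (List Int)) (cols : List Int) (j : Nat)
    (hj : j < cols.length)
    (h : ∀ r ∈ grid, cols.length ≤ r.length) :
    (grid.foldl (fun c row => bAddRow c (row.take c.length)) cols).getD j 0
      = cols.getD j 0 + aColSum grid j := by
  induction grid generalizing cols with
  | nil => simp [aColSum]
  | cons r rs ih =>
      have hr : cols.length ≤ r.length := h r (by simp)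
      have hlen : (bAddRow cols (r.take cols.length)).length = cols.length := bAddRow_length _ _
      simp only [List.foldl_cons]
      rw [ih (bAddRow cols (r.take cols.length)) (by rw [hlen]; exact hj)
            (by intro x hx; rw [hlen]; exact h x (by simp [hx]))]
      rw [bAddRow_getD cols (r.take cols.length) j hj (by simp [hr])]
      have htake : (r.take cols.length).getD j 0 = r.getD j 0 := by
        rw [List.getD_eq_getElem?_getD, List.getD_eq_getElem?_getD,
          List.getElem?_take_of_lt hj]
      rw [htake]
      simp only [aColSum, List.foldl_cons]
      rw [foldl_add_init rs _ (0 + PySem.List.pyGetD r (Int.ofNat j) 0)]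
      have hget : PySem.List.pyGetD r (Int.ofNat j) 0 = r.getD j 0 := by
        simp [PySem.List.pyGetD_natCast]
      rw [hget]; ring

-- A's early-exit column loop equals List.all over the index list
theorem aColsCheck_eq_all (grid : List (List Int)) (js : List Nat) :
    aColsCheck grid js = js.all (fun j => PySem.Int.mod (aColSum grid j) 2 == 0) := by
  induction js with
  | nil => rfl
  | cons j js ih =>
      unfold aColsCheck
      by_cases hj : PySem.Int.mod (aColSum grid j) 2 ≠ 0
      · rw [if_pos hj]
        have hb : (PySem.Int.mod (aColSum grid j) 2 == 0) = false :=
          beq_eq_false_iff_ne.mpr hj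
        rw [List.all_cons, hb, Bool.false_and]
      · rw [if_neg hj]
        simp only [ne_eq, not_not] at hj
        have hb : (PySem.Int.mod (aColSum grid j) 2 == 0) = true :=
          beq_iff_eq.mpr hj
        rw [List.all_cons, hb, Bool.true_and, ih]

-- existence of an odd row forces A's row phase to return False
theorem aRowsCheck_false_of_odd (grid : List (List Int))
    (h : ∃ r ∈ grid, PySem.Int.mod (r.foldl (· + ·) 0) 2 ≠ 0) :
    aRowsCheck grid = false := by
  induction grid with
  | nil => simp at h
  | cons r rs ih =>
      unfold aRowsCheck
      by_cases hr : PySem.Int.mod (r.foldl (· + ·) 0) 2 ≠ 0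
      · rw [if_pos hr]
      · rw [if_neg hr]
        simp only [List.mem_cons] at h
        obtain ⟨x, hx, hodd⟩ := h
        cases hx with
        | inl he => exact absurd (he ▸ hodd) hr
        | inr hm => exact ih ⟨x, hm, hodd⟩

-- ===== VERDICT (by name: the statement is the Claim_ definition above) =====
theorem isEvenParity_spec : Claim_equal_isEvenParity := by
  intro grid _ hpre
  obtain ⟨hne, hcase⟩ := hpre
  unfold Spec_isEvenParity
  by_cases hrows : aRowsCheck grid = true
  · -- all row sums even; Pre_'s second disjunct must hold
    have hlen : ∀ r ∈ grid, (PySem.List.pyGetD grid 0 []).length ≤ r.length := by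
      cases hcase with
      | inl hodd => exact absurd hrows (by simp [aRowsCheck_false_of_odd grid hodd])
      | inr h => exact h
    unfold isEvenParity isEvenParity_alt
    rw [hrows, if_pos rfl,
      bLoop_some_of_rows_true grid _ hrows]
    set n := (PySem.List.pyGetD grid 0 []).length with hn
    set final := grid.foldl (fun c row => bAddRow c (row.take c.length)) (List.replicate n 0)
      with hfinal
    have hflen : final.length = n := by
      rw [hfinal, fold_length]; simp
    rw [aColsCheck_eq_all]
    rw [Bool.eq_iff_iff]
    simp only [List.all_eq_true]
    constructor
    · intro hall c hc
      obtain ⟨j, hj, hje⟩ := List.mem_iff_getElem.mp hc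
      have hj' : j < n := by rwa [hflen] at hj
      have hgd : final.getD j 0 = c := by
        rw [List.getD_eq_getElem?_getD, List.getElem?_eq_getElem hj, hje]; rfl
      have hcol : c = aColSum grid j := by
        rw [← hgd, hfinal, fold_getD grid _ j (by simp [hj']) (by simpa using hlen)]
        simp
      rw [hcol]
      exact hall j (List.mem_range.mpr hj')
    · intro hall j hj
      have hj' : j < n := List.mem_range.mp hj
      have hjf : j < final.length := by rwa [hflen]
      have hmem : final.getD j 0 ∈ final := by
        rw [List.getD_eq_getElem?_getD, List.getElem?_eq_getElem hjf]
        simp only [Option.getD_some]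
        exact List.getElem_mem _
      have heq : final.getD j 0 = aColSum grid j := by
        rw [hfinal, fold_getD grid _ j (by simp [hj']) (by simpa using hlen)]
        simp
      rw [← heq]
      exact hall _ hmem
  · -- some row sum is odd: both return false
    have hrows' : aRowsCheck grid = false := by
      cases h : aRowsCheck grid
      · rfl
      · exact absurd h hrows
    unfold isEvenParity isEvenParity_alt
    rw [hrows', bLoop_none_of_rows_false grid _ hrows']
    simp
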